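-- pv_equiv track=rewrite | github.com/ducdat2004/BaiTap-OJ | VeTamGiacCan.py | veTamGiac
-- ===== SOURCE A (Python) =====
-- def veTamGiac(n):
--     j = "*"
--     s = ""
--     soCanh = (n * 2 - 1)
--     lap1 = soCanh // 2 + 1
--     for i in range(lap1):
--         s += j
--         s += '\n'
--         j +="*"
--     k = ""
--     for i in range(len(j) - 2):
--         k+="*"
--     for i in range(soCanh - lap1):
--         s += k
--         s += '\n'
--         n = ""
--         for p in range(len(k) - 1):
--             n += "*"
--         k = n
--     return s
-- ===== SOURCE B (Python) =====
-- def veTamGiac(n):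
--     rows = []
--     for i in range(2 * n - 1):
--         c = n - abs(i - (n - 1))
--         rows.append('*' * c + '\n')
--     return ''.join(rows)
-- ===== Notes on version B (the rewrite author's own statement) =====
-- stated objective: simpler
-- what changed: Replaces A's two-phase scheme (grow a star string upward, then repeatedly rebuild a shrinking star string downward with nested rebuild loops) by a single pass over all rows whose star count comes from a closed arithmetic form of the row index, joined at the end.
import Mathlib
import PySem

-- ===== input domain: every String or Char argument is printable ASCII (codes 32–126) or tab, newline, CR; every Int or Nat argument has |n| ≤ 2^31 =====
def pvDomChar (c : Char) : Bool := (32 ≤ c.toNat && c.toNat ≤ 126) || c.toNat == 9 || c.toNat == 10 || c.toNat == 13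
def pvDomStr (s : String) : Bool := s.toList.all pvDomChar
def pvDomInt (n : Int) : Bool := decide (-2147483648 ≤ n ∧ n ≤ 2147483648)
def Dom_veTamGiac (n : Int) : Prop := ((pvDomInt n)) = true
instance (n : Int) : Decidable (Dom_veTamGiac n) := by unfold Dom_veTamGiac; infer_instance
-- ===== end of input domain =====

-- B replaces A's grow-then-shrink two-phase string building by one loop over all rows
-- with each row's star count computed in closed form (objective: simpler).

-- ===== PORT A =====
-- Python strings are ported as List Char (PySem's list side) and packed with
-- String.ofList only at the return; each += is a list append, exact on ASCII.
def veTamGiac (n : Int) : String :=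
  let j : List Char := ['*']
  let s : List Char := []
  let soCanh : Int := n * 2 - 1
  let lap1 : Int := PySem.Int.floordiv soCanh 2 + 1
  let sj := (PySem.List.pyRange 0 lap1 1).foldl
      (fun (sj : List Char × List Char) _ => (sj.1 ++ sj.2 ++ ['\n'], sj.2 ++ ['*'])) (s, j)
  let k : List Char := (PySem.List.pyRange 0 ((sj.2.length : Int) - 2) 1).foldl
      (fun (k : List Char) _ => k ++ ['*']) []
  let sk := (PySem.List.pyRange 0 (soCanh - lap1) 1).foldl
      (fun (sk : List Char × List Char) _ =>
        (sk.1 ++ sk.2 ++ ['\n'],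
         (PySem.List.pyRange 0 ((sk.2.length : Int) - 1) 1).foldl
           (fun (m : List Char) _ => m ++ ['*']) []))
      (sj.1, k)
  String.ofList sk.1

-- ===== PORT B =====
def veTamGiac_alt (n : Int) : String :=
  let rows := (PySem.List.pyRange 0 (2 * n - 1) 1).foldl
      (fun (rows : List (List Char)) i =>
        rows ++ [PySem.List.pyRepeat ['*'] (n - |i - (n - 1)|) ++ ['\n']]) []
  String.ofList (PySem.Chars.join [] rows)

-- ===== PRECONDITION & SPEC =====
def Spec_veTamGiac (n : Int) (out : String) : Prop := out = veTamGiac_alt n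
instance (n : Int) (out : String) : Decidable (Spec_veTamGiac n out) := by unfold Spec_veTamGiac; infer_instance

-- ===== CLAIM (what is proved, stated in full; the proofs are below) =====
def Claim_equal_veTamGiac : Prop := ∀ (n : Int), Dom_veTamGiac n → Spec_veTamGiac n (veTamGiac n)

-- ===== LEMMAS AND PROOFS =====

/-- `stars c` = a row of `c` asterisks. -/
def stars (c : Nat) : List Char := List.replicate c '*'

/-- rows of widths 1,2,…,m (built upward, each with trailing newline). -/
def asc : Nat → List Char
  | 0 => []
  | m + 1 => asc m ++ stars (m + 1) ++ ['\n']

/-- rows of widths c,c-1,…,1 (built downward, each with trailing newline). -/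
def desc : Nat → List Char
  | 0 => []
  | c + 1 => stars (c + 1) ++ '\n' :: desc c

/-- A foldl whose step ignores the element is an iterate of the step on the state. -/
lemma foldl_ignore {α σ : Type} (f : σ → σ) :
    ∀ (l : List α) (init : σ), l.foldl (fun s _ => f s) init = f^[l.length] init := by
  intro l
  induction l with
  | nil => intro init; rfl
  | cons x xs ih => intro init; simp [List.foldl, ih, Function.iterate_succ_apply]

/-- The star-growing inner loops of A append one `'*'` per index. -/
lemma grow_eq (t : Int) (init : List Char) :
    (PySem.List.pyRange 0 t 1).foldl (fun (m : List Char) _ => m ++ ['*']) init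
      = init ++ stars t.toNat := by
  rw [foldl_ignore]
  rw [PySem.List.length_pyRange_one]
  have : (t - 0).toNat = t.toNat := by omega
  rw [this]
  induction t.toNat with
  | zero => simp [stars]
  | succ m ih =>
      rw [Function.iterate_succ_apply', ih]
      simp [stars, List.replicate_succ']

def stepA1 (sj : List Char × List Char) : List Char × List Char :=
  (sj.1 ++ sj.2 ++ ['\n'], sj.2 ++ ['*'])

def stepA2 (sk : List Char × List Char) : List Char × List Char :=
  (sk.1 ++ sk.2 ++ ['\n'],
   (PySem.List.pyRange 0 ((sk.2.length : Int) - 1) 1).foldl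
     (fun (m : List Char) _ => m ++ ['*']) [])

/-- First loop of A: after m iterations, s = asc m and j = stars (m+1). -/
lemma loop1_eq (m : Nat) : stepA1^[m] ([], stars 1) = (asc m, stars (m + 1)) := by
  induction m with
  | zero => rfl
  | succ m ih =>
      rw [Function.iterate_succ_apply', ih]
      simp [stepA1, asc, stars, List.replicate_succ']

/-- One shrink step of A's second loop. -/
lemma stepA2_stars (s : List Char) (c : Nat) :
    stepA2 (s, stars c) = (s ++ stars c ++ ['\n'], stars (c - 1)) := by
  unfold stepA2
  rw [grow_eq]
  simp [stars]

/-- Second loop of A: starting from k = stars m, m iterations append desc m. -/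
lemma loop2_eq (m : Nat) : ∀ s : List Char,
    stepA2^[m] (s, stars m) = (s ++ desc m, stars 0) := by
  induction m with
  | zero => intro s; simp [desc]
  | succ m ih =>
      intro s
      rw [Function.iterate_succ_apply, stepA2_stars, Nat.add_sub_cancel, ih]
      simp [desc]

/-- (2*n-1) // 2 = n - 1 (exact floor division). -/
lemma lap1_eq (n : Int) : PySem.Int.floordiv (n * 2 - 1) 2 = n - 1 := by
  rw [PySem.Int.floordiv_eq_iff_of_pos (by omega)]
  omega

/-- B's row of index i, as a function. -/
def rowB (n : Int) (i : Int) : List Char :=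
  PySem.List.pyRepeat ['*'] (n - |i - (n - 1)|) ++ ['\n']

lemma rowB_eq (n i : Int) : rowB n i = stars (n - |i - (n - 1)|).toNat ++ ['\n'] := by
  simp [rowB, PySem.List.pyRepeat_singleton, stars]

/-- join with empty separator is flatten. -/
lemma join_nil_eq_flatten : ∀ rows : List (List Char), PySem.Chars.join [] rows = rows.flatten := by
  intro rows
  induction rows with
  | nil => simp [PySem.Chars.join_nil]
  | cons r rest ih =>
      cases rest with
      | nil => simp [PySem.Chars.join_singleton]
      | cons r' rest' =>
          rw [PySem.Chars.join_cons_cons, ih]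
          simp

/-- Ascending half of B equals asc. -/
lemma partB1 (n : Int) (_hn : 1 ≤ n) :
    ∀ m : Nat, (m : Int) ≤ n →
      (PySem.List.pyRange 0 (m : Int) 1).flatMap (rowB n) = asc m := by
  intro m
  induction m with
  | zero => intro _; simp [PySem.List.pyRange_one_eq_nil, asc]
  | succ m ih =>
      intro hm
      rw [show ((m + 1 : Nat) : Int) = (m : Int) + 1 by push_cast; ring]
      rw [PySem.List.pyRange_one_succ_right (by omega)]
      rw [List.flatMap_append, ih (by omega)]
      simp only [List.flatMap_cons, List.flatMap_nil, List.append_nil]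
      rw [rowB_eq]
      have habs : |(m : Int) - (n - 1)| = n - 1 - m := by
        rw [abs_of_nonpos (by omega)]; ring
      rw [habs]
      have : (n - (n - 1 - (m : Int))).toNat = m + 1 := by omega
      rw [this, asc]
      simp

/-- Descending half of B equals desc. -/
lemma partB2 (n : Int) (_hn : 1 ≤ n) :
    ∀ c : Nat, (c : Int) ≤ n - 1 →
      (PySem.List.pyRange (2 * n - 1 - c) (2 * n - 1) 1).flatMap (rowB n) = desc c := by
  intro c
  induction c with
  | zero => intro _; simp [PySem.List.pyRange_one_eq_nil, desc]
  | succ c ih =>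
      intro hc
      rw [PySem.List.pyRange_one_cons (by push_cast; omega)]
      rw [List.flatMap_cons]
      have hstep : 2 * n - 1 - ((c + 1 : Nat) : Int) + 1 = 2 * n - 1 - (c : Int) := by
        push_cast; ring
      rw [hstep, ih (by push_cast at hc ⊢; omega)]
      rw [rowB_eq]
      have habs : |(2 * n - 1 - ((c + 1 : Nat) : Int)) - (n - 1)| = n - 1 - ((c : Int) + 1) + 1 := by
        rw [abs_of_nonneg (by push_cast at hc ⊢; omega)]; push_cast; ring
      rw [habs]
      have : (n - ((n : Int) - 1 - ((c : Int) + 1) + 1)).toNat = c + 1 := by omega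
      rw [this, desc]
      simp

/-- A's value in closed form. -/
lemma a_closed (n : Int) :
    veTamGiac n = String.ofList (if n ≤ 0 then [] else asc n.toNat ++ desc (n.toNat - 1)) := by
  unfold veTamGiac
  simp only
  rw [lap1_eq]
  have hl : n - 1 + 1 = n := by ring
  rw [hl]
  by_cases hn : n ≤ 0
  · rw [PySem.List.pyRange_one_eq_nil (by omega)]
    simp only [List.foldl_nil]
    rw [PySem.List.pyRange_one_eq_nil (by norm_num),
        PySem.List.pyRange_one_eq_nil (by omega)]
    simp [hn]
  · push_neg at hn
    rw [if_neg (by omega)]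
    have h1 : (PySem.List.pyRange 0 n 1).foldl
        (fun (sj : List Char × List Char) _ => (sj.1 ++ sj.2 ++ ['\n'], sj.2 ++ ['*'])) ([], ['*'])
        = (asc n.toNat, stars (n.toNat + 1)) := by
      rw [show (fun (sj : List Char × List Char) _ => (sj.1 ++ sj.2 ++ ['\n'], sj.2 ++ ['*']))
            = (fun sj (_ : Int) => stepA1 sj) from rfl]
      rw [foldl_ignore, PySem.List.length_pyRange_one]
      rw [show ((n - 0).toNat) = n.toNat from by omega]
      rw [show (([] : List Char), (['*'] : List Char)) = (([] : List Char), stars 1) from rfl]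
      exact loop1_eq n.toNat
    rw [h1]
    simp only
    rw [show ((stars (n.toNat + 1)).length : Int) - 2 = ((n.toNat : Int) - 1) by
         simp [stars]; omega]
    rw [grow_eq]
    simp only [List.nil_append]
    rw [show (((n.toNat : Int) - 1).toNat) = n.toNat - 1 from by omega]
    rw [show (fun (sk : List Char × List Char) _ => (sk.1 ++ sk.2 ++ ['\n'],
          (PySem.List.pyRange 0 ((sk.2.length : Int) - 1) 1).foldl
            (fun (m : List Char) _ => m ++ ['*']) []))
        = (fun sk (_ : Int) => stepA2 sk) from rfl]
    rw [foldl_ignore, PySem.List.length_pyRange_one]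
    rw [show (n * 2 - 1 - n - 0).toNat = n.toNat - 1 from by omega]
    rw [loop2_eq]

/-- B's value in closed form. -/
lemma b_closed (n : Int) :
    veTamGiac_alt n = String.ofList (if n ≤ 0 then [] else asc n.toNat ++ desc (n.toNat - 1)) := by
  unfold veTamGiac_alt
  simp only
  rw [show (fun (rows : List (List Char)) i =>
        rows ++ [PySem.List.pyRepeat ['*'] (n - |i - (n - 1)|) ++ ['\n']])
      = (fun (rows : List (List Char)) i => rows ++ [rowB n i]) from rfl]
  rw [PySem.List.foldl_append_singleton_eq_map]
  rw [join_nil_eq_flatten, List.nil_append, ← List.flatMap_def]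
  by_cases hn : n ≤ 0
  · rw [PySem.List.pyRange_one_eq_nil (by omega)]
    simp [hn]
  · push_neg at hn
    rw [if_neg (by omega)]
    rw [PySem.List.pyRange_one_append 0 n (2 * n - 1) (by omega) (by omega), List.flatMap_append]
    have h1 := partB1 n hn n.toNat (by omega)
    rw [show ((n.toNat : Int)) = n from by omega] at h1
    have h2 := partB2 n hn (n.toNat - 1) (by omega)
    rw [show (2 * n - 1 - ((n.toNat - 1 : Nat) : Int)) = n from by omega] at h2
    rw [h1, h2]

-- ===== VERDICT (by name: the statement is the Claim_ definition above) =====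
theorem veTamGiac_spec : Claim_equal_veTamGiac := by
  intro n _
  unfold Spec_veTamGiac
  rw [a_closed, b_closed]
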